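-- pv_equiv track=rewrite | github.com/sskong777/Algorithm_Study | Programmers/힙/더맵게_김설희.py | solution
-- ===== SOURCE A (Python) =====
-- import heapq
--
-- def solution(scoville, K):
--     # heapify : 리스트를 힙으로 변환, 기존 리스트의 순서는 변경되지만 힙의 특성을 유지
--     heapq.heapify(scoville)
--
--     cnt = 0
--     while scoville and scoville[0] < K:
--         heapq.heappush(scoville, heapq.heappop(scoville) + heapq.heappop(scoville) * 2)
--         cnt += 1
--
--         if len(scoville) == 1 and scoville[0] < K:
--             return -1
--
--     return cnt
-- ===== SOURCE B (Python) =====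
-- def solution(scoville, K):
--     # No ordered structure: each round one linear scan finds the two smallest
--     # values simultaneously; they are removed and the blend appended to an
--     # unordered pool.  (A mutates its argument into heap order; B does not
--     # mutate the caller's list.)
--     pool = list(scoville)
--     cnt = 0
--     while pool and min(pool) < K:
--         if len(pool) == 1:
--             return -1
--         m1, m2 = None, None
--         for x in pool:
--             if m1 is None or x < m1:
--                 m1, m2 = x, m1
--             elif m2 is None or x < m2:
--                 m2 = x
--         pool.remove(m1)
--         pool.remove(m2)
--         pool.append(m1 + 2 * m2)
--         cnt += 1
--     return cnt
-- ===== Notes on version B (the rewrite author's own statement) =====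
-- stated objective: alternative
-- what changed: B maintains no ordered structure at all: instead of A's heap, each round a single linear scan finds the two smallest values simultaneously, removes them and appends the blend to an unordered pool, with the cannot-succeed check moved to the loop head.
import Mathlib
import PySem

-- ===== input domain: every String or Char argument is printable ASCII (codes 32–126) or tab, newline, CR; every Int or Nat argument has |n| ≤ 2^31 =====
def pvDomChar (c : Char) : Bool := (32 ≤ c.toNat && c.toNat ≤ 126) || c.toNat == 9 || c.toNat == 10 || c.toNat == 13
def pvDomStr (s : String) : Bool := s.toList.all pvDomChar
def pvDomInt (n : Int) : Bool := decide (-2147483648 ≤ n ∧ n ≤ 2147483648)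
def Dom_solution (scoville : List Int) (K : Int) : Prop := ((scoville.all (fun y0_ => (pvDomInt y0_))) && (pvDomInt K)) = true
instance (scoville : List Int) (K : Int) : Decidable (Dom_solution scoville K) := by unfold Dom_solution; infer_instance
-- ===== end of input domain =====

-- B drops A's heap entirely: each round one linear scan finds the two smallest values at once in an
-- unordered pool (alternative algorithm, no speed claim). A mutates the caller's list (heapify) and
-- B does not; the equivalence proved here is about the RETURN value only.

-- ===== PORT A =====
-- The heapq calls are ported by their value semantics on the multiset state: heapify is the identity
-- on the multiset, heappop removes a first minimal element (PySem.List.min? + List.erase), heappush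
-- appends; scoville[0] on a heap is its minimum, read as headI on the length-1 branch.
-- The fuel (= current length) is a totality guard only: each iteration shrinks the pool by one and
-- the loop exits on its own at length ≤ 1, so the fuel is never exhausted before the loop exits.
def solutionLoopA (K : Int) : Nat → List Int → Int → Int
  | 0, _, cnt => cnt
  | fuel+1, h, cnt =>
    match PySem.List.min? h (fun x => x) with
    | none => cnt                               -- while scoville … : empty, loop exits
    | some m =>
      if m < K then
        let h1 := h.erase m                     -- first heappop
        match PySem.List.min? h1 (fun x => x) with
        | none => 0                             -- second heappop raises IndexError (outside Pre_)
        | some m2 =>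
          let h2 := (h1.erase m2) ++ [m + m2 * 2]   -- heappush of the blend
          if h2.length = 1 ∧ h2.headI < K then -1
          else solutionLoopA K fuel h2 (cnt + 1)
      else cnt

def solution (scoville : List Int) (K : Int) : Int :=
  solutionLoopA K scoville.length scoville 0

-- ===== PORT B =====
-- the single-pass for-loop of Source B tracking the two smallest values seen so far
def tsStep (st : Option Int × Option Int) (x : Int) : Option Int × Option Int :=
  match st with
  | (none, _) => (some x, none)                       -- m1, m2 = x, m1   (m1 was None, hence m2 too)
  | (some a, m2) =>
    if x < a then (some x, some a)                    -- m1, m2 = x, m1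
    else
      match m2 with
      | none => (some a, some x)                      -- m2 = x
      | some b => if x < b then (some a, some x) else (some a, some b)

-- Same fuel-as-totality-guard remark as for solutionLoopA.
def solutionLoopB (K : Int) : Nat → List Int → Int → Int
  | 0, _, cnt => cnt
  | fuel+1, pool, cnt =>
    match PySem.List.min? pool (fun x => x) with      -- while pool and min(pool) < K
    | none => cnt
    | some m =>
      if m < K then
        if pool.length = 1 then -1
        else
          match pool.foldl tsStep (none, none) with
          | (some m1, some m2) =>
              let pool2 := ((pool.erase m1).erase m2) ++ [m1 + 2 * m2]
              solutionLoopB K fuel pool2 (cnt + 1)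
          | _ => 0                                    -- unreachable: length ≥ 2 fills both slots
      else cnt

def solution_alt (scoville : List Int) (K : Int) : Int :=
  solutionLoopB K scoville.length scoville 0

-- ===== PRECONDITION & SPEC =====
-- Pre_ excludes exactly the singleton lists whose element is below K: there the second heappop of A
-- raises IndexError, so A returns no value.
def Pre_solution (scoville : List Int) (K : Int) : Prop :=
  scoville.length ≠ 1 ∨ K ≤ scoville.headI
instance (scoville : List Int) (K : Int) : Decidable (Pre_solution scoville K) := by
  unfold Pre_solution; infer_instance

def pvWitness_solution : List Int × Int := ([1, 2, 3, 9, 10, 12], 7)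

def Spec_solution (scoville : List Int) (K : Int) (out : Int) : Prop := out = solution_alt scoville K
instance (scoville : List Int) (K : Int) (out : Int) : Decidable (Spec_solution scoville K out) := by unfold Spec_solution; infer_instance

-- ===== CLAIM (what is proved, stated in full; the proofs are below) =====
def Claim_equal_solution : Prop := ∀ (scoville : List Int) (K : Int), Dom_solution scoville K → Pre_solution scoville K → Spec_solution scoville K (solution scoville K)

-- ===== LEMMAS AND PROOFS =====

-- "v is the minimum value of l" — both ports' extremal elements satisfy this, and it is unique.
def IsMinVal (l : List Int) (v : Int) : Prop := v ∈ l ∧ ∀ x ∈ l, v ≤ x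

lemma isMinVal_unique {l : List Int} {v w : Int} (hv : IsMinVal l v) (hw : IsMinVal l w) : v = w :=
  le_antisymm (hv.2 w hw.1) (hw.2 v hv.1)

lemma isMinVal_of_min? {l : List Int} {v : Int} (h : PySem.List.min? l (fun x => x) = some v) :
    IsMinVal l v :=
  ⟨PySem.List.min?_mem h, fun x hx => PySem.List.min?_isMin h x hx⟩

lemma isMinVal_perm {l l' : List Int} {v : Int} (hp : l.Perm l') (hv : IsMinVal l v) :
    IsMinVal l' v :=
  ⟨hp.mem_iff.1 hv.1, fun x hx => hv.2 x (hp.mem_iff.2 hx)⟩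

-- invariant of Source B's single-pass scan, over the processed prefix q
def TsInv (st : Option Int × Option Int) (q : List Int) : Prop :=
  match st with
  | (none, _) => q = [] ∧ st.2 = none
  | (some a, none) => q = [a]
  | (some a, some b) => IsMinVal q a ∧ IsMinVal (q.erase a) b

lemma tsStep_inv {st : Option Int × Option Int} {q : List Int} (hinv : TsInv st q) (x : Int) :
    TsInv (tsStep st x) (q ++ [x]) := by
  obtain ⟨m1, m2⟩ := st
  cases m1 with
  | none =>
      obtain ⟨rfl, rfl⟩ := hinv
      simp [tsStep, TsInv]
  | some a =>
      cases m2 with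
      | none =>
          have hq : q = [a] := hinv
          subst hq
          simp only [tsStep]
          by_cases hxa : x < a
          · simp only [if_pos hxa, TsInv]
            have hne : ¬ (a == x) = true := by simp; omega
            refine ⟨⟨by simp, ?_⟩, ?_⟩
            · intro y hy; simp at hy; rcases hy with rfl | rfl <;> omega
            · simp [hne, IsMinVal]
          · simp only [if_neg hxa, TsInv]
            refine ⟨⟨by simp, ?_⟩, ?_⟩
            · intro y hy; simp at hy; rcases hy with rfl | rfl <;> omega
            · simp [IsMinVal]
      | some b =>
          obtain ⟨ha, hb⟩ := hinv
          have haq : a ∈ q := ha.1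
          have hab : a ≤ b := ha.2 b (List.mem_of_mem_erase hb.1)
          simp only [tsStep]
          by_cases hxa : x < a
          · simp only [if_pos hxa, TsInv]
            constructor
            · exact ⟨by simp, fun y hy => by
                rcases List.mem_append.1 hy with hy | hy
                · exact le_of_lt (lt_of_lt_of_le hxa (ha.2 y hy))
                · simp at hy; omega⟩
            · have hxq : x ∉ q := fun hx => absurd (ha.2 x hx) (by omega)
              rw [List.erase_append_right _ (by simpa using hxq)]
              simpa [List.erase_cons_head] using ha
          · have hax : a ≤ x := by omega
            have herase : (q ++ [x]).erase a = q.erase a ++ [x] :=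
              List.erase_append_left _ haq
            have hmins : IsMinVal (q ++ [x]) a :=
              ⟨List.mem_append.2 (Or.inl haq), fun y hy => by
                rcases List.mem_append.1 hy with hy | hy
                · exact ha.2 y hy
                · simp at hy; omega⟩
            simp only [if_neg hxa]
            by_cases hxb : x < b
            · simp only [if_pos hxb, TsInv]
              refine ⟨hmins, ?_⟩
              rw [herase]
              exact ⟨List.mem_append.2 (Or.inr (by simp)), fun y hy => by
                rcases List.mem_append.1 hy with hy | hy
                · exact le_of_lt (lt_of_lt_of_le hxb (hb.2 y hy))
                · simp at hy; omega⟩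
            · simp only [if_neg hxb, TsInv]
              refine ⟨hmins, ?_⟩
              rw [herase]
              exact ⟨List.mem_append.2 (Or.inl hb.1), fun y hy => by
                rcases List.mem_append.1 hy with hy | hy
                · exact hb.2 y hy
                · simp at hy; omega⟩

lemma tsFold_inv : ∀ (p q : List Int) (st : Option Int × Option Int),
    TsInv st q → TsInv (p.foldl tsStep st) (q ++ p) := by
  intro p
  induction p with
  | nil => intro q st h; simpa using h
  | cons x xs ih =>
      intro q st h
      have := ih (q ++ [x]) (tsStep st x) (tsStep_inv h x)
      simpa using this

-- for a pool of length ≥ 2 the scan yields (some m1, some m2) with m1 = min, m2 = min of the rest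
lemma tsFold_spec {pool : List Int} (hlen : 2 ≤ pool.length) :
    ∃ m1 m2, pool.foldl tsStep (none, none) = (some m1, some m2) ∧
      IsMinVal pool m1 ∧ IsMinVal (pool.erase m1) m2 := by
  have h := tsFold_inv pool [] (none, none) (by simp [TsInv])
  simp only [List.nil_append] at h
  cases hfold : pool.foldl tsStep (none, none) with
  | mk o1 o2 =>
    rw [hfold] at h
    cases o1 with
    | none => obtain ⟨rfl, _⟩ := h; simp at hlen
    | some a =>
      cases o2 with
      | none => rw [h] at hlen; simp at hlen
      | some b => exact ⟨a, b, rfl, h.1, h.2⟩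

-- Loop equivalence: if A's heap is a permutation of B's pool, the fuel covers the length, and a
-- singleton state is only entered at or above K (A never re-enters the loop otherwise), the loops agree.
lemma loopAB (K : Int) : ∀ (fuel : Nat) (h s : List Int) (cnt : Int),
    h.Perm s → h.length ≤ fuel → (∀ v, h = [v] → K ≤ v) →
    solutionLoopA K fuel h cnt = solutionLoopB K fuel s cnt := by
  intro fuel
  induction fuel with
  | zero => intro h s cnt _ _ _; rfl
  | succ fuel ih =>
      intro h s cnt hp hfuel hsing
      cases hminA : PySem.List.min? h (fun x => x) with
      | none =>
          have : h = [] := (PySem.List.min?_eq_none_iff ..).1 hminA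
          subst this
          have : s = [] := hp.symm.eq_nil
          subst this
          simp [solutionLoopA, solutionLoopB, hminA]
      | some m =>
          have hmA : IsMinVal h m := isMinVal_of_min? hminA
          have hmS : IsMinVal s m := isMinVal_perm hp hmA
          have hsne : s ≠ [] := fun hnil => List.not_mem_nil (hnil ▸ hmS.1)
          obtain ⟨m', hminB⟩ : ∃ m', PySem.List.min? s (fun x => x) = some m' := by
            cases hm : PySem.List.min? s (fun x => x) with
            | none => exact absurd ((PySem.List.min?_eq_none_iff ..).1 hm) hsne
            | some m' => exact ⟨m', rfl⟩
          have hmm : m' = m := isMinVal_unique (isMinVal_of_min? hminB) hmS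
          rw [hmm] at hminB
          simp only [solutionLoopA, solutionLoopB, hminA, hminB]
          by_cases hmK : m < K
          · simp only [if_pos hmK]
            have hlen2 : 2 ≤ h.length := by
              rcases hA : h with _ | ⟨a, _ | ⟨b, t⟩⟩
              · exact absurd (hA ▸ hmA.1) (by simp)
              · exfalso
                have h1 : K ≤ a := hsing a hA
                have h2 : m = a := by have := hA ▸ hmA.1; simpa using this
                omega
              · simp
            have hlenEq : h.length = s.length := hp.length_eq
            have hs1 : ¬ s.length = 1 := by omega
            rw [if_neg hs1]
            obtain ⟨m1, m2, hfold, hm1, hm2⟩ := tsFold_spec (by omega : 2 ≤ s.length)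
            have e1 : m1 = m := isMinVal_unique hm1 hmS
            rw [e1] at hfold hm2
            have hperm1 : (h.erase m).Perm (s.erase m) := hp.erase m
            have h1ne : h.erase m ≠ [] := by
              have : (h.erase m).length = h.length - 1 := List.length_erase_of_mem hmA.1
              intro hnil; rw [hnil] at this; simp at this; omega
            obtain ⟨mB, hminA2⟩ : ∃ mB, PySem.List.min? (h.erase m) (fun x => x) = some mB := by
              cases hm : PySem.List.min? (h.erase m) (fun x => x) with
              | none => exact absurd ((PySem.List.min?_eq_none_iff ..).1 hm) h1ne
              | some mB => exact ⟨mB, rfl⟩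
            have e2 : m2 = mB :=
              isMinVal_unique hm2 (isMinVal_perm hperm1 (isMinVal_of_min? hminA2))
            rw [e2] at hfold
            rw [hfold, hminA2]
            dsimp only
            have hperm2 : (((h.erase m).erase mB) ++ [m + mB * 2]).Perm
                (((s.erase m).erase mB) ++ [m + 2 * mB]) := by
              have : m + mB * 2 = m + 2 * mB := by ring
              rw [this]
              exact (hperm1.erase mB).append (List.Perm.refl _)
            have hlenA2 : ((h.erase m).erase mB).length + 1 ≤ fuel := by
              have l1 : (h.erase m).length = h.length - 1 := List.length_erase_of_mem hmA.1
              have l2 : ((h.erase m).erase mB).length = (h.erase m).length - 1 :=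
                List.length_erase_of_mem (PySem.List.min?_mem hminA2)
              omega
            by_cases hstop : (((h.erase m).erase mB) ++ [m + mB * 2]).length = 1 ∧
                (((h.erase m).erase mB) ++ [m + mB * 2]).headI < K
            · -- A returns -1 now; B recurses into a singleton below K and returns -1 one step later
              rw [if_pos hstop]
              have hnilA : (h.erase m).erase mB = [] := by
                have h1 := hstop.1
                rw [List.length_append, List.length_singleton] at h1
                exact List.eq_nil_of_length_eq_zero (by omega)
              have hblend : (m + mB * 2) < K := by
                have := hstop.2; rw [hnilA] at this; simpa using this
              have hsnil : (s.erase m).erase mB = [] := by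
                have hp2 := hperm1.erase mB
                rw [hnilA] at hp2
                exact hp2.symm.eq_nil
              rw [hsnil]
              obtain ⟨fuel', rfl⟩ : ∃ f', fuel = f' + 1 := ⟨fuel - 1, by omega⟩
              have : m + 2 * mB < K := by omega
              simp [solutionLoopB, PySem.List.min?, this]
            · rw [if_neg hstop]
              refine ih _ _ _ hperm2 (by simpa using hlenA2) ?_
              intro v hv
              have hnilA : (h.erase m).erase mB = [] := by
                have hl := congrArg List.length hv
                simp only [List.length_append, List.length_singleton] at hl
                exact List.eq_nil_of_length_eq_zero (by omega)
              have hvval : v = m + mB * 2 := by rw [hnilA] at hv; simpa using hv.symm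
              by_contra hKv
              exact hstop ⟨by simp [hnilA], by rw [hnilA]; simpa [hvval] using lt_of_not_ge hKv⟩
          · simp only [if_neg hmK]

-- ===== VERDICT (by name: the statement is the Claim_ definition above) =====
theorem solution_spec : Claim_equal_solution := by
  intro scoville K _hdom hpre
  unfold Spec_solution solution solution_alt
  refine (loopAB K scoville.length scoville scoville 0 (List.Perm.refl _) le_rfl ?_).symm ▸ rfl
  intro v hv
  rcases hpre with hlen | hK
  · exact absurd (by simp [hv]) hlen
  · simpa [hv] using hK
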